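-- pv_equiv track=rewrite | github.com/ShimShining/wheat | race/prac/algo/interview/hw/find_two_prime_sum.py | find_two_prime_sum
-- ===== SOURCE A (Python) =====
-- def is_prime(num):
--     if num < 2:
--         return False
--     if num % 2 == 0:
--         return False
--     i = 2
--     while i * i <= num:
--         if num % i == 0:
--             return False
--         i += 1
--     return True
--
-- def find_two_prime_sum(arr):
--     n = int(arr[0])
--     left, right = n // 2, n // 2
--     while right < n:
--         if is_prime(left) and is_prime(right):
--             return left, right
--         left -= 1
--         right += 1
-- ===== SOURCE B (Python) =====
-- def _is_odd_prime_by(ps, m):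
--     # m is prime in A's sense (an odd prime) iff m is odd, >= 3, and has no
--     # divisor among the precomputed primes p (ascending) with p*p <= m
--     if m < 3 or m % 2 == 0:
--         return False
--     for p in ps:
--         if p * p > m:
--             break
--         if m % p == 0:
--             return False
--     return True
--
-- def find_two_prime_sum(arr):
--     n = int(arr[0])
--     # precompute the odd primes p with p*p < n, trial-dividing only by smaller primes
--     ps = []
--     i = 3
--     while i * i < n:
--         if _is_odd_prime_by(ps, i):
--             ps.append(i)
--         i += 2
--     half = n // 2
--     # both members of a valid pair are odd, so only odd right-candidates are scanned
--     r = half if half % 2 == 1 else half + 1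
--     while r < n:
--         l = 2 * half - r
--         if _is_odd_prime_by(ps, l) and _is_odd_prime_by(ps, r):
--             return l, r
--         r += 2
--     return None
-- ===== Notes on version B (the rewrite author's own statement) =====
-- stated objective: alternative
-- what changed: B precomputes once the table of odd primes below sqrt(n) (each candidate trial-divided only by the smaller primes already in the table) and scans only odd right-candidates, deriving the left partner as 2*(n//2)-r, instead of A's full trial division from 2 on every left/right value including the even ones.
-- outside the precondition, e.g. on find_two_prime_sum([]): A raises IndexError, B raises IndexError
import Mathlib
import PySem

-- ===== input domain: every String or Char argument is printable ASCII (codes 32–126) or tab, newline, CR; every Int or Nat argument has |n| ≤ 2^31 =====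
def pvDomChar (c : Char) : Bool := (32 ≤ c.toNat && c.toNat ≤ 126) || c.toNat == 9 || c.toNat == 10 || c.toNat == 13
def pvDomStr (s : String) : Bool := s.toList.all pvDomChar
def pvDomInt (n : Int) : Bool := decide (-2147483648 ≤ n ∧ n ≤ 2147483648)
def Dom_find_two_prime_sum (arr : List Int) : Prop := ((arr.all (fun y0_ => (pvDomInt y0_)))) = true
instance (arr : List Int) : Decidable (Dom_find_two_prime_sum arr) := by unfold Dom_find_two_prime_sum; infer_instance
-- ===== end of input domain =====

-- B replaces A's per-candidate trial division from 2 by a one-time table of the odd primes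
-- below sqrt(n) (each built by dividing only by the smaller primes) and scans only the odd
-- right-candidates, deriving the left partner (a different algorithm of similar measured cost).

-- termination helper cited by the ports' decreasing_by
theorem pv_le_mul_self (i : Int) : i ≤ i * i := by
  rcases Int.lt_or_le i 1 with h | h
  · have := mul_self_nonneg i; omega
  · have h2 : 1 * i ≤ i * i := by
      apply mul_le_mul_of_nonneg_right <;> omega
    omega

-- ===== PORT A =====
-- the 'while i * i <= num' trial-division loop of is_prime
def pvTrialLoop (num i : Int) : Bool :=
  if h : i * i ≤ num then
    if PySem.Int.mod num i == 0 then false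
    else pvTrialLoop num (i + 1)
  else true
termination_by (num + 1 - i).toNat
decreasing_by have := pv_le_mul_self i; omega

def is_prime (num : Int) : Bool :=
  if num < 2 then false
  else if PySem.Int.mod num 2 == 0 then false
  else pvTrialLoop num 2

-- the 'while right < n' outward loop of A
def pvSearchA (n left right : Int) : Option (Int × Int) :=
  if h : right < n then
    if is_prime left && is_prime right then some (left, right)
    else pvSearchA n (left - 1) (right + 1)
  else none
termination_by (n - right).toNat
decreasing_by omega

def find_two_prime_sum (arr : List Int) : Option (Int × Int) :=
  -- indexing the first element raises IndexError on the empty list; Pre_ excludes it, so the default is unreachable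
  let n := (PySem.List.pyGet? arr 0).getD 0
  pvSearchA n (PySem.Int.floordiv n 2) (PySem.Int.floordiv n 2)

-- ===== PORT B =====
-- the 'for p in ps: … break' loop of _is_odd_prime_by
def pvDivLoop : List Int → Int → Bool
  | [], _ => true
  | p :: rest, m =>
    if p * p > m then true
    else if PySem.Int.mod m p == 0 then false
    else pvDivLoop rest m

def is_odd_prime_by (ps : List Int) (m : Int) : Bool :=
  if m < 3 then false
  else if PySem.Int.mod m 2 == 0 then false
  else pvDivLoop ps m

-- the 'while i * i < n' prime-table loop
def pvBuildPs (n : Int) (ps : List Int) (i : Int) : List Int :=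
  if h : i * i < n then
    pvBuildPs n (if is_odd_prime_by ps i then ps ++ [i] else ps) (i + 2)
  else ps
termination_by (n - i).toNat
decreasing_by have := pv_le_mul_self i; omega

-- the 'while r < n' scan over odd right-candidates
def pvScanB (n half : Int) (ps : List Int) (r : Int) : Option (Int × Int) :=
  if h : r < n then
    if is_odd_prime_by ps (2 * half - r) && is_odd_prime_by ps r then some (2 * half - r, r)
    else pvScanB n half ps (r + 2)
  else none
termination_by (n - r).toNat
decreasing_by omega

def find_two_prime_sum_alt (arr : List Int) : Option (Int × Int) :=
  let n := (PySem.List.pyGet? arr 0).getD 0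
  let ps := pvBuildPs n [] 3
  let half := PySem.Int.floordiv n 2
  let r := if PySem.Int.mod half 2 == 1 then half else half + 1
  pvScanB n half ps r

-- ===== PRECONDITION & SPEC =====
-- Python A indexes the first element, which raises IndexError exactly on the empty list
def Pre_find_two_prime_sum (arr : List Int) : Prop := arr ≠ []
instance (arr : List Int) : Decidable (Pre_find_two_prime_sum arr) := by unfold Pre_find_two_prime_sum; infer_instance
def pvWitness_find_two_prime_sum : List Int := [10]

def Spec_find_two_prime_sum (arr : List Int) (out : Option (Int × Int)) : Prop := out = find_two_prime_sum_alt arr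
instance (arr : List Int) (out : Option (Int × Int)) : Decidable (Spec_find_two_prime_sum arr out) := by unfold Spec_find_two_prime_sum; infer_instance

-- ===== CLAIM (what is proved, stated in full; the proofs are below) =====
def Claim_equal_find_two_prime_sum : Prop := ∀ (arr : List Int), Dom_find_two_prime_sum arr → Pre_find_two_prime_sum arr → Spec_find_two_prime_sum arr (find_two_prime_sum arr)

-- ===== LEMMAS AND PROOFS =====

-- "m is a prime in A's sense": odd, at least 3, and with no divisor j with j*j ≤ m
def pvOP (m : Int) : Prop := 3 ≤ m ∧ m % 2 = 1 ∧ ∀ j : Int, 2 ≤ j → j * j ≤ m → ¬ (j ∣ m)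

theorem pvOP_no_prime_divisor (m : Int) (h3 : 3 ≤ m) (hodd : m % 2 = 1)
    (h : ∀ q : Int, pvOP q → q * q ≤ m → ¬ (q ∣ m)) : pvOP m := by
  refine ⟨h3, hodd, ?_⟩
  intro j h2j hjj hdvd
  set N := m.toNat with hNdef
  have hmN : (N : Int) = m := Int.toNat_of_nonneg (by omega)
  have hjN : j.toNat ∣ N := by
    have hc : ((j.toNat : Int)) ∣ ((N : Int)) := by
      rw [hmN, Int.toNat_of_nonneg (by omega : (0:Int) ≤ j)]; exact hdvd
    exact_mod_cast hc
  have h2jj : 2 * j ≤ j * j := mul_le_mul_of_nonneg_right h2j (by omega)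
  have hjlt : j.toNat < N := by omega
  have hnp : ¬ N.Prime := by
    intro hp
    rcases hp.eq_one_or_self_of_dvd _ hjN with h1 | h1 <;> omega
  have hq := Nat.minFac_prime (n := N) (by omega)
  have hqd : N.minFac ∣ N := Nat.minFac_dvd N
  have hqsq : N.minFac ^ 2 ≤ N := Nat.minFac_sq_le_self (by omega) hnp
  set q := N.minFac with hqdef
  have hqdm : (q : Int) ∣ m := by rw [← hmN]; exact_mod_cast hqd
  have hq2 : q ≠ 2 := by
    intro he
    rw [he] at hqdm
    omega
  have hqodd : q % 2 = 1 := by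
    rcases hq.eq_two_or_odd with h' | h' <;> omega
  have hq3 : 3 ≤ q := by have := hq.two_le; omega
  have hOPq : pvOP (q : Int) := by
    refine ⟨by exact_mod_cast hq3, by omega, ?_⟩
    intro j' h2j' hjj' hdvd'
    have hj'N : j'.toNat ∣ q := by
      have hc : ((j'.toNat : Int)) ∣ ((q : Int)) := by
        rw [Int.toNat_of_nonneg (by omega : (0:Int) ≤ j')]; exact hdvd'
      exact_mod_cast hc
    have h2jj' : 2 * j' ≤ j' * j' := mul_le_mul_of_nonneg_right h2j' (by omega)
    rcases hq.eq_one_or_self_of_dvd _ hj'N with h1 | h1 <;> omega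
  refine h (q : Int) hOPq ?_ hqdm
  have : (q : Int) * (q : Int) = ((q ^ 2 : Nat) : Int) := by push_cast; ring
  rw [this, ← hmN]
  exact_mod_cast hqsq

theorem pvTrialLoop_iff (num : Int) : ∀ k (i : Int), (num + 1 - i).toNat = k → 2 ≤ i →
    (pvTrialLoop num i = true ↔ ∀ j : Int, i ≤ j → j * j ≤ num → ¬ (j ∣ num)) := by
  intro k
  induction k using Nat.strong_induction_on with
  | _ k IH =>
    intro i hk h2
    rw [pvTrialLoop]
    by_cases h : i * i ≤ num
    · rw [dif_pos h]
      have hi := pv_le_mul_self i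
      by_cases hd : PySem.Int.mod num i = 0
      · have hdvd : i ∣ num := (PySem.Int.mod_eq_zero_iff_dvd num i).mp hd
        rw [if_pos (by simp [hd])]
        simp only [Bool.false_eq_true, false_iff]
        push Not
        exact ⟨i, le_rfl, h, hdvd⟩
      · have hndvd : ¬ (i ∣ num) := fun hc => hd ((PySem.Int.mod_eq_zero_iff_dvd num i).mpr hc)
        rw [if_neg (by simp [hd])]
        rw [IH ((num + 1 - (i + 1)).toNat) (by omega) (i + 1) rfl (by omega)]
        constructor
        · intro hall j hij hjj
          rcases eq_or_lt_of_le hij with heq | hlt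
          · exact heq ▸ hndvd
          · exact hall j (by omega) hjj
        · intro hall j hij hjj
          exact hall j (by omega) hjj
    · rw [dif_neg h]
      simp only [true_iff]
      intro j hij hjj hdvd
      have : i * i ≤ j * j := mul_le_mul hij hij (by omega) (by omega)
      omega

theorem is_prime_iff (num : Int) : is_prime num = true ↔ pvOP num := by
  unfold is_prime
  by_cases h1 : num < 2
  · rw [if_pos h1]
    simp only [Bool.false_eq_true, false_iff]
    rintro ⟨h3, -, -⟩; omega
  · rw [if_neg h1]
    by_cases h2 : num % 2 = 0
    · rw [if_pos (by simp [h2])]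
      simp only [Bool.false_eq_true, false_iff]
      rintro ⟨-, ho, -⟩; omega
    · rw [if_neg (by simp [h2])]
      have h3 : 3 ≤ num := by omega
      rw [pvTrialLoop_iff num ((num + 1 - 2).toNat) 2 rfl (by norm_num)]
      unfold pvOP
      constructor
      · intro hall; exact ⟨h3, by omega, hall⟩
      · rintro ⟨-, -, hall⟩; exact hall

theorem pvDivLoop_iff (ps : List Int) (m : Int) (h3 : ∀ p ∈ ps, 3 ≤ p)
    (hpair : ps.Pairwise (· ≤ ·)) :
    pvDivLoop ps m = true ↔ ∀ p ∈ ps, p * p ≤ m → ¬ (p ∣ m) := by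
  induction ps with
  | nil => simp [pvDivLoop]
  | cons p rest IH =>
    rw [List.pairwise_cons] at hpair
    obtain ⟨hle, hpair'⟩ := hpair
    have hp3 : 3 ≤ p := h3 p (List.mem_cons_self ..)
    rw [pvDivLoop]
    by_cases hb : p * p > m
    · rw [if_pos hb]
      simp only [true_iff]
      intro q hq hqq hdvd
      rcases List.mem_cons.mp hq with rfl | hq'
      · omega
      · have hpq : p ≤ q := hle q hq'
        have : p * p ≤ q * q := mul_le_mul hpq hpq (by omega) (by omega)
        omega
    · rw [if_neg hb]
      push Not at hb
      by_cases hd : PySem.Int.mod m p = 0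
      · have hdvd : p ∣ m := (PySem.Int.mod_eq_zero_iff_dvd m p).mp hd
        rw [if_pos (by simp [hd])]
        simp only [Bool.false_eq_true, false_iff]
        push Not
        exact ⟨p, List.mem_cons_self .., hb, hdvd⟩
      · have hndvd : ¬ (p ∣ m) := fun hc => hd ((PySem.Int.mod_eq_zero_iff_dvd m p).mpr hc)
        rw [if_neg (by simp [hd])]
        rw [IH (fun q hq => h3 q (List.mem_cons_of_mem _ hq)) hpair']
        constructor
        · intro hall q hq hqq
          rcases List.mem_cons.mp hq with rfl | hq'
          · exact hndvd
          · exact hall q hq' hqq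
        · intro hall q hq hqq
          exact hall q (List.mem_cons_of_mem _ hq) hqq

theorem is_odd_prime_by_iff (ps : List Int) (m : Int)
    (hps : ∀ p ∈ ps, pvOP p) (hpair : ps.Pairwise (· ≤ ·))
    (hcomplete : ∀ q : Int, pvOP q → q * q ≤ m → q ∈ ps) :
    is_odd_prime_by ps m = true ↔ pvOP m := by
  unfold is_odd_prime_by
  by_cases h1 : m < 3
  · rw [if_pos h1]
    simp only [Bool.false_eq_true, false_iff]
    rintro ⟨h3, -, -⟩; omega
  · rw [if_neg h1]
    by_cases h2 : m % 2 = 0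
    · rw [if_pos (by simp [h2])]
      simp only [Bool.false_eq_true, false_iff]
      rintro ⟨-, ho, -⟩; omega
    · rw [if_neg (by simp [h2])]
      rw [pvDivLoop_iff ps m (fun p hp => (hps p hp).1) hpair]
      constructor
      · intro hall
        apply pvOP_no_prime_divisor m (by omega) (by omega)
        intro q hq hqq
        exact hall q (hcomplete q hq hqq) hqq
      · rintro ⟨-, -, hdiv⟩ p hp hpp
        have := (hps p hp).1
        exact hdiv p (by omega) hpp

theorem pvBuildPs_spec (n : Int) : ∀ k (i : Int) (ps : List Int), (n - i).toNat = k → i % 2 = 1 → 3 ≤ i →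
    (∀ p : Int, p ∈ ps ↔ pvOP p ∧ p < i ∧ p * p < n) → ps.Pairwise (· ≤ ·) →
    (∀ p : Int, p ∈ pvBuildPs n ps i ↔ pvOP p ∧ p * p < n) ∧ (pvBuildPs n ps i).Pairwise (· ≤ ·) := by
  intro k
  induction k using Nat.strong_induction_on with
  | _ k IH =>
    intro i ps hk hodd h3 hmem hpair
    rw [pvBuildPs]
    by_cases h : i * i < n
    · rw [dif_pos h]
      have hii := pv_le_mul_self i
      have htest : is_odd_prime_by ps i = true ↔ pvOP i := by
        apply is_odd_prime_by_iff
        · intro p hp; exact ((hmem p).mp hp).1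
        · exact hpair
        · intro q hq hqq
          have hq3 : 3 ≤ q := hq.1
          have h3q : 3 * q ≤ q * q := mul_le_mul_of_nonneg_right hq3 (by omega)
          have hqi : q < i := by linarith
          exact (hmem q).mpr ⟨hq, hqi, by linarith⟩
      by_cases ht : is_odd_prime_by ps i = true
      · rw [if_pos ht]
        apply IH ((n - (i + 2)).toNat) (by omega) (i + 2) _ rfl (by omega) (by omega)
        · intro p
          simp only [List.mem_append, List.mem_singleton]
          constructor
          · rintro (hp | rfl)
            · obtain ⟨hop, hlt, hpp⟩ := (hmem p).mp hp
              exact ⟨hop, by omega, hpp⟩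
            · exact ⟨htest.mp ht, by omega, h⟩
          · rintro ⟨hop, hlt, hpp⟩
            have hpodd : p % 2 = 1 := hop.2.1
            by_cases hpi : p = i
            · right; exact hpi
            · left; exact (hmem p).mpr ⟨hop, by omega, hpp⟩
        · apply List.pairwise_append.mpr
          refine ⟨hpair, List.pairwise_singleton _ _, ?_⟩
          intro a ha b hb
          rw [List.mem_singleton] at hb
          subst hb
          have := ((hmem a).mp ha).2.1
          omega
      · rw [if_neg ht]
        apply IH ((n - (i + 2)).toNat) (by omega) (i + 2) ps rfl (by omega) (by omega) _ hpair
        intro p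
        rw [hmem p]
        constructor
        · rintro ⟨hop, hlt, hpp⟩; exact ⟨hop, by omega, hpp⟩
        · rintro ⟨hop, hlt, hpp⟩
          have hpodd : p % 2 = 1 := hop.2.1
          refine ⟨hop, ?_, hpp⟩
          by_cases hpi : p = i
          · exact absurd (htest.mpr (hpi ▸ hop)) ht
          · omega
    · rw [dif_neg h]
      push Not at h
      refine ⟨?_, hpair⟩
      intro p
      rw [hmem p]
      constructor
      · rintro ⟨hop, -, hpp⟩; exact ⟨hop, hpp⟩
      · rintro ⟨hop, hpp⟩
        refine ⟨hop, ?_, hpp⟩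
        by_contra hc
        push Not at hc
        have h3p : 3 ≤ p := hop.1
        have : i * i ≤ p * p := mul_le_mul hc hc (by omega) (by omega)
        linarith

theorem is_prime_even (m : Int) (h : m % 2 = 0) : is_prime m = false := by
  unfold is_prime
  by_cases h1 : m < 2
  · rw [if_pos h1]
  · rw [if_neg h1]
    rw [if_pos (by simp [h])]

theorem pvChar (n : Int) (ps : List Int)
    (hmem : ∀ p : Int, p ∈ ps ↔ pvOP p ∧ p * p < n) (hpair : ps.Pairwise (· ≤ ·))
    (m : Int) (hm : m < n) : is_odd_prime_by ps m = is_prime m := by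
  have ha : is_odd_prime_by ps m = true ↔ pvOP m := by
    apply is_odd_prime_by_iff ps m (fun p hp => ((hmem p).mp hp).1) hpair
    intro q hq hqq
    exact (hmem q).mpr ⟨hq, by linarith⟩
  have hb := is_prime_iff m
  by_cases hOP : pvOP m
  · rw [ha.mpr hOP, hb.mpr hOP]
  · rw [Bool.eq_false_iff.mpr (fun hc => hOP (ha.mp hc)),
        Bool.eq_false_iff.mpr (fun hc => hOP (hb.mp hc))]

theorem pvScan_eq (n half : Int) (ps : List Int)
    (hmem : ∀ p : Int, p ∈ ps ↔ pvOP p ∧ p * p < n) (hpair : ps.Pairwise (· ≤ ·)) :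
    ∀ k (r : Int), (n - r).toNat = k → half ≤ r → r % 2 = 1 →
      pvSearchA n (2 * half - r) r = pvScanB n half ps r := by
  intro k
  induction k using Nat.strong_induction_on with
  | _ k IH =>
    intro r hk hhr hrodd
    rw [pvSearchA, pvScanB]
    by_cases hrn : r < n
    · rw [dif_pos hrn, dif_pos hrn]
      have hchar := pvChar n ps hmem hpair
      rw [hchar (2 * half - r) (by omega), hchar r hrn]
      by_cases hp : (is_prime (2 * half - r) && is_prime r) = true
      · rw [if_pos hp, if_pos hp]
      · rw [if_neg hp, if_neg hp]
        rw [pvSearchA]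
        by_cases hr1 : r + 1 < n
        · rw [dif_pos hr1]
          rw [is_prime_even (2 * half - r - 1) (by omega)]
          simp only [Bool.false_and]
          rw [if_neg (by simp)]
          rw [show 2 * half - r - 1 - 1 = 2 * half - (r + 2) by ring,
              show r + 1 + 1 = r + 2 by ring]
          exact IH ((n - (r + 2)).toNat) (by omega) (r + 2) rfl (by omega) (by omega)
        · rw [dif_neg hr1]
          rw [pvScanB, dif_neg (by omega : ¬ (r + 2 < n))]
    · rw [dif_neg hrn, dif_neg hrn]

-- ===== VERDICT (by name: the statement is the Claim_ definition above) =====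
theorem find_two_prime_sum_spec : Claim_equal_find_two_prime_sum := by
  unfold Claim_equal_find_two_prime_sum
  intro arr _ _
  unfold Spec_find_two_prime_sum
  simp only [find_two_prime_sum, find_two_prime_sum_alt]
  set n := (PySem.List.pyGet? arr 0).getD 0 with hn
  obtain ⟨hmem, hpair⟩ := pvBuildPs_spec n ((n - 3).toNat) 3 [] rfl (by norm_num) (by norm_num)
    (by
      intro p
      simp only [List.not_mem_nil, false_iff]
      rintro ⟨hop, hlt, -⟩
      have := hop.1
      omega)
    List.Pairwise.nil
  set half := PySem.Int.floordiv n 2 with hhalf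
  by_cases hpar : half % 2 = 1
  · rw [if_pos (by simp [hpar])]
    have h := pvScan_eq n half _ hmem hpair ((n - half).toNat) half rfl le_rfl hpar
    rw [show 2 * half - half = half by ring] at h
    exact h
  · rw [if_neg (by simp [hpar])]
    have h0 : half % 2 = 0 := by omega
    by_cases hhn : half < n
    · rw [pvSearchA, dif_pos hhn, is_prime_even half h0]
      simp only [Bool.false_and]
      rw [if_neg (by simp)]
      have h := pvScan_eq n half _ hmem hpair ((n - (half + 1)).toNat) (half + 1) rfl (by omega) (by omega)
      rw [show 2 * half - (half + 1) = half - 1 by ring] at h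
      exact h
    · rw [pvSearchA, dif_neg hhn, pvScanB, dif_neg (by omega)]
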